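-- pv_equiv track=rewrite | github.com/widgeton/Python_GB | Homework/Lesson_09/main.py | show_field
-- ===== SOURCE A (Python) =====
-- def show_field(field):
--     txt = ''
--     for i in range(len(field)):
--         if not i % 3:
--             txt += f'\n{"-" * 25}\n'
--         txt += f'{field[i]:^8}'
--     txt += f"\n{'-' * 25}"
--     return txt
-- ===== SOURCE B (Python) =====
-- def show_field(field):
--     sep = '-' * 25
--     rows = []
--     for i in range(0, len(field), 3):
--         chunk = field[i:i+3]
--         rows.append('\n' + sep + '\n' + ''.join(f'{x:^8}' for x in chunk))
--     return ''.join(rows) + '\n' + sep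
-- ===== Notes on version B (the rewrite author's own statement) =====
-- stated objective: alternative
-- what changed: Iterates over 3-element chunks (range with step 3 plus slicing) building one row string per chunk, instead of a per-element loop that tests i % 3 to decide when to emit the separator.
import Mathlib
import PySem

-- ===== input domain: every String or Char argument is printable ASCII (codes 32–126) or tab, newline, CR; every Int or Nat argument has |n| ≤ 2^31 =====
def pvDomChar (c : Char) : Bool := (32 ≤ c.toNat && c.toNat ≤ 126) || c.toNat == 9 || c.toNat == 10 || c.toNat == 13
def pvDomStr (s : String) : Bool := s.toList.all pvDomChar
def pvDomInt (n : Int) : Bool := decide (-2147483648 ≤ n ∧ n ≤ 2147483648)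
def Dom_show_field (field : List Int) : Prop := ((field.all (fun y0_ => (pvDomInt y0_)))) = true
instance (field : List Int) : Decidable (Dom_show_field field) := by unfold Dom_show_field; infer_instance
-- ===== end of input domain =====

-- B builds the grid by iterating over 3-element chunks (one row string per chunk) instead of
-- A's per-element loop with an i % 3 separator test; alternative decomposition, same cost.


-- shared helper: Python f'{x:^8}' — centre str(x) in width 8, extra space on the right
def pvCenter8 (x : Int) : String :=
  let s := PySem.Int.toStr x
  let pad := 8 - s.length
  String.mk (List.replicate (pad / 2) ' ') ++ s ++ String.mk (List.replicate (pad - pad / 2) ' ')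

def pvDashes : String := "-------------------------"   -- '-' * 25

-- ===== PORT A =====
-- A's for-loop over indices: carries the running index i and the accumulated text txt
def pvALoop : List Int → Nat → String → String
  | [], _, txt => txt
  | x :: xs, i, txt =>
      pvALoop xs (i + 1)
        ((if i % 3 == 0 then txt ++ "\n" ++ pvDashes ++ "\n" else txt) ++ pvCenter8 x)

def show_field (field : List Int) : String :=
  pvALoop field 0 "" ++ "\n" ++ pvDashes

-- ===== PORT B =====
-- field[i:i+3] chunks taken by structural recursion (range(0, len, 3) + slicing)
def pvChunk3 : List Int → List (List Int)
  | [] => []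
  | x :: xs => (x :: xs.take 2) :: pvChunk3 (xs.drop 2)
termination_by xs => xs.length
decreasing_by simp [List.length_drop]

def pvRow (c : List Int) : String :=
  "\n" ++ pvDashes ++ "\n" ++ String.join (c.map pvCenter8)

def show_field_alt (field : List Int) : String :=
  String.join ((pvChunk3 field).map pvRow) ++ "\n" ++ pvDashes

-- ===== PRECONDITION & SPEC =====
def Spec_show_field (field : List Int) (out : String) : Prop := out = show_field_alt field
instance (field : List Int) (out : String) : Decidable (Spec_show_field field out) := by unfold Spec_show_field; infer_instance

-- ===== CLAIM (what is proved, stated in full; the proofs are below) =====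
def Claim_equal_show_field : Prop := ∀ (field : List Int), Dom_show_field field → Spec_show_field field (show_field field)

-- ===== LEMMAS AND PROOFS =====

theorem pvFoldl_append_shift (l : List String) : ∀ a : String,
    List.foldl (fun r s => r ++ s) a l = a ++ List.foldl (fun r s => r ++ s) "" l := by
  induction l with
  | nil => intro a; simp [List.foldl]
  | cons s l ih =>
      intro a
      simp only [List.foldl]
      rw [ih (a ++ s), ih ("" ++ s), String.append_assoc]
      simp

theorem pvJoin_cons (s : String) (l : List String) :
    String.join (s :: l) = s ++ String.join l := by
  simp only [String.join, List.foldl]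
  rw [pvFoldl_append_shift l ("" ++ s)]
  simp

-- only i % 3 matters to A's loop
theorem pvALoop_mod (xs : List Int) : ∀ i txt, pvALoop xs (i + 3) txt = pvALoop xs i txt := by
  induction xs with
  | nil => intro i txt; rfl
  | cons x xs ih =>
      intro i txt
      simp only [pvALoop, Nat.add_mod_right]
      have : i + 3 + 1 = i + 1 + 3 := by omega
      rw [this, ih]

theorem pvALoop_chunks (xs : List Int) : ∀ txt,
    pvALoop xs 0 txt = txt ++ String.join ((pvChunk3 xs).map pvRow) := by
  induction xs using pvChunk3.induct with
  | case1 => intro txt; simp [pvALoop, pvChunk3, String.join]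
  | case2 x xs ih =>
      intro txt
      match xs with
      | [] =>
          simp [pvALoop, pvChunk3, pvRow, String.join, String.append_assoc]
      | [y] =>
          simp [pvALoop, pvChunk3, pvRow, String.join, String.append_assoc]
      | y :: z :: rest =>
          have h3 : pvALoop rest 3 = pvALoop rest 0 := by
            funext txt; exact pvALoop_mod rest 0 txt
          simp only [pvALoop, List.take, List.drop, pvChunk3] at *
          rw [h3, ih, List.map_cons, pvJoin_cons]
          simp [pvRow, String.join, String.append_assoc]

theorem show_field_eq (field : List Int) : show_field field = show_field_alt field := by
  unfold show_field show_field_alt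
  rw [pvALoop_chunks]
  simp

-- ===== VERDICT (by name: the statement is the Claim_ definition above) =====
theorem show_field_spec : Claim_equal_show_field := by
  intro field _
  exact show_field_eq field
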